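-- pv_equiv track=rewrite | github.com/yalisommer/DAND | mesh.py | _get_boundary_set
-- ===== SOURCE A (Python) =====
-- def _get_boundary_set(faces):
--     """Return set of vertex indices that lie on a boundary edge (shared by only 1 face)."""
--     from collections import defaultdict
--     edge_count = defaultdict(int)
--     for face in faces:
--         n = len(face)
--         for k in range(n):
--             e = tuple(sorted([int(face[k]), int(face[(k + 1) % n])]))
--             edge_count[e] += 1
--     boundary = set()
--     for (a, b), c in edge_count.items():
--         if c == 1:
--             boundary.add(a)
--             boundary.add(b)
--     return boundary
-- ===== SOURCE B (Python) =====
-- def _get_boundary_set(faces):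
--     """Return set of vertex indices that lie on a boundary edge (shared by only 1 face)."""
--     edges = []
--     for face in faces:
--         n = len(face)
--         for k in range(n):
--             a, b = int(face[k]), int(face[(k + 1) % n])
--             edges.append((a, b) if a <= b else (b, a))
--     s = sorted(edges)
--     singles = []
--     i = 0
--     while i < len(s):
--         j = i + 1
--         while j < len(s) and s[j] == s[i]:
--             j += 1
--         if j == i + 1:
--             singles.append(s[i])
--         i = j
--     boundary = set()
--     for a, b in edges:
--         if (a, b) in singles:
--             boundary.add(a)
--             boundary.add(b)
--     return boundary
-- ===== Notes on version B (the rewrite author's own statement) =====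
-- stated objective: alternative
-- what changed: B replaces A's hash-map (defaultdict) edge-multiplicity counting with building the flat list of normalised edges, sorting it, and run-length-scanning the sorted list for edges that occur exactly once; the boundary set is then collected in one filtering pass over the original edge list.
import Mathlib
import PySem

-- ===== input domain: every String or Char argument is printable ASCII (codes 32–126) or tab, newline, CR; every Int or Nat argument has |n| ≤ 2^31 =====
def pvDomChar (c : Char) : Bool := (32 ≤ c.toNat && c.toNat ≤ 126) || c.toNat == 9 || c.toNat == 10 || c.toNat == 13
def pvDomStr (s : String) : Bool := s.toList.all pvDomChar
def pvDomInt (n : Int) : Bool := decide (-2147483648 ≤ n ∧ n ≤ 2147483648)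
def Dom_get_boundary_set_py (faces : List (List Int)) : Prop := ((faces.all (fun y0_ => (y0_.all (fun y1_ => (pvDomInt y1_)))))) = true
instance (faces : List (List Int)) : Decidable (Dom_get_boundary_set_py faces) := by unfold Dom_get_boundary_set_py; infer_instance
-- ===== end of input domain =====

-- B replaces A's hash-map edge counting with a sort-then-group run-length scan over the flat
-- edge list (objective: alternative algorithm, similar cost); both return the same set, in the
-- same first-insertion order.

-- ===== PORT A =====
-- edge normalisation 'tuple(sorted([int(face[k]), int(face[(k+1) % n])]))';
-- k always lies in range(len(face)), so the pyGetD default 0 is never used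
def pvEdgeA (face : List Int) (k : Int) : Int × Int :=
  let a := PySem.List.pyGetD face k 0
  let b := PySem.List.pyGetD face (PySem.Int.mod (k + 1) (face.length : Int)) 0
  if b < a then (b, a) else (a, b)

def get_boundary_set_py (faces : List (List Int)) : List Int :=
  let ec := faces.foldl (fun d face =>
    (PySem.List.pyRange 0 (face.length : Int) 1).foldl (fun d k =>
      d.modify (pvEdgeA face k) 0 (· + 1)) d) (PySem.Dict.empty : PySem.Dict (Int × Int) Int)
  ec.items.foldl (fun s p =>
    if p.2 == 1 then PySem.Set.add (PySem.Set.add s p.1.1) p.1.2 else s) PySem.Set.empty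

-- ===== PORT B =====
-- '(a, b) if a <= b else (b, a)'
def pvEdgeB (face : List Int) (k : Int) : Int × Int :=
  let a := PySem.List.pyGetD face k 0
  let b := PySem.List.pyGetD face (PySem.Int.mod (k + 1) (face.length : Int)) 0
  if a ≤ b then (a, b) else (b, a)

-- the run-length scan of Source B's while loop: a run of equal elements of length 1 is kept
def pvRunSingles : List (Int × Int) → List (Int × Int)
  | [] => []
  | x :: xs =>
    (if xs.takeWhile (fun y => y == x) = [] then [x] else []) ++
      pvRunSingles (xs.dropWhile (fun y => y == x))
termination_by s => s.length
decreasing_by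
  simp only [List.length_cons]
  exact Nat.lt_succ_of_le (List.length_dropWhile_le _ _)

def get_boundary_set_py_alt (faces : List (List Int)) : List Int :=
  let edges := faces.foldl (fun acc face =>
    (PySem.List.pyRange 0 (face.length : Int) 1).foldl (fun acc k =>
      acc ++ [pvEdgeB face k]) acc) []
  let s := PySem.List.sorted2 edges Prod.fst Prod.snd
  let singles := pvRunSingles s
  edges.foldl (fun bset e =>
    if singles.contains e then PySem.Set.add (PySem.Set.add bset e.1) e.2 else bset)
    PySem.Set.empty

-- ===== PRECONDITION & SPEC =====
def Spec_get_boundary_set_py (faces : List (List Int)) (out : List Int) : Prop := out = get_boundary_set_py_alt faces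
instance (faces : List (List Int)) (out : List Int) : Decidable (Spec_get_boundary_set_py faces out) := by unfold Spec_get_boundary_set_py; infer_instance

-- ===== CLAIM (what is proved, stated in full; the proofs are below) =====
def Claim_equal_get_boundary_set_py : Prop := ∀ (faces : List (List Int)), Dom_get_boundary_set_py faces → Spec_get_boundary_set_py faces (get_boundary_set_py faces)

-- ===== LEMMAS AND PROOFS =====

-- the two edge normalisations agree
theorem pvEdge_eq : pvEdgeA = pvEdgeB := by
  funext face k
  simp only [pvEdgeA, pvEdgeB]
  split_ifs with h1 h2 h2 <;> first | rfl | omega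

-- proof-only abbreviations: the flat list of normalised edges
def pvEdges (face : List Int) : List (Int × Int) :=
  (PySem.List.pyRange 0 (face.length : Int) 1).map (pvEdgeB face)

def pvEs (faces : List (List Int)) : List (Int × Int) := faces.flatMap pvEdges

-- lexicographic ≤ on pairs (Python tuple order)
def pvRle (a b : Int × Int) : Prop := a.1 < b.1 ∨ (a.1 = b.1 ∧ a.2 ≤ b.2)

theorem pvRle_trans {a b c : Int × Int} (h1 : pvRle a b) (h2 : pvRle b c) : pvRle a c := by
  simp only [pvRle] at *; omega

theorem pvRle_antisymm {a b : Int × Int} (h1 : pvRle a b) (h2 : pvRle b a) : a = b := by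
  obtain ⟨a1, a2⟩ := a; obtain ⟨b1, b2⟩ := b
  simp only [pvRle] at *
  simp only [Prod.mk.injEq]
  omega

-- sorted2's comparator (reverse = false)
def pvBefore (a b : Int × Int) : Bool :=
  decide (a.1 < b.1) || (!decide (b.1 < a.1) && decide (a.2 < b.2))

theorem pvBefore_true_rle {a b : Int × Int} (h : pvBefore a b = true) : pvRle a b := by
  simp only [pvBefore, Bool.or_eq_true, Bool.and_eq_true, Bool.not_eq_true',
    decide_eq_true_eq, decide_eq_false_iff_not] at h
  simp only [pvRle]; omega

theorem pvBefore_false_rle {a b : Int × Int} (h : pvBefore a b = false) : pvRle b a := by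
  simp only [pvBefore, Bool.or_eq_false_iff, Bool.and_eq_false_iff, Bool.not_eq_false',
    decide_eq_true_eq, decide_eq_false_iff_not] at h
  simp only [pvRle]
  rcases h with ⟨h1, h2 | h2⟩ <;> omega

theorem pvInsertBy_pairwise (x : Int × Int) (acc : List (Int × Int))
    (h : acc.Pairwise pvRle) : (PySem.List.insertBy pvBefore x acc).Pairwise pvRle := by
  induction acc with
  | nil => simp [PySem.List.insertBy]
  | cons y ys ih =>
    rw [List.pairwise_cons] at h
    by_cases hb : pvBefore x y = true
    · rw [PySem.List.insertBy, if_pos hb]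
      refine List.Pairwise.cons ?_ (List.Pairwise.cons h.1 h.2)
      intro z hz
      rcases List.mem_cons.mp hz with rfl | hz
      · exact pvBefore_true_rle hb
      · exact pvRle_trans (pvBefore_true_rle hb) (h.1 z hz)
    · rw [PySem.List.insertBy, if_neg hb]
      refine List.Pairwise.cons ?_ (ih h.2)
      intro z hz
      rcases (PySem.List.mem_insertBy pvBefore x z ys).mp hz with rfl | hz
      · exact pvBefore_false_rle (by simpa using hb)
      · exact h.1 z hz

theorem pvSorted2_pairwise (es : List (Int × Int)) :
    (PySem.List.sorted2 es Prod.fst Prod.snd).Pairwise pvRle := by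
  show (es.foldl (fun acc x => PySem.List.insertBy pvBefore x acc) []).Pairwise pvRle
  have : ∀ (l : List (Int × Int)) (acc : List (Int × Int)), acc.Pairwise pvRle →
      (l.foldl (fun acc x => PySem.List.insertBy pvBefore x acc) acc).Pairwise pvRle := by
    intro l
    induction l with
    | nil => intro acc h; exact h
    | cons x l ih => intro acc h; exact ih _ (pvInsertBy_pairwise x acc h)
  exact this es [] (by simp)

-- membership in the run-length singles of a lex-sorted list is 'appears exactly once'
theorem pvRunSingles_mem (s : List (Int × Int)) (hs : s.Pairwise pvRle) (e : Int × Int) :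
    e ∈ pvRunSingles s ↔ s.count e = 1 := by
  match s with
  | [] => simp [pvRunSingles]
  | x :: xs =>
    rw [List.pairwise_cons] at hs
    obtain ⟨hhead, hpw⟩ := hs
    have hsplit : xs.takeWhile (fun y => y == x) ++ xs.dropWhile (fun y => y == x) = xs :=
      List.takeWhile_append_dropWhile
    have htx : ∀ y ∈ xs.takeWhile (fun y => y == x), y = x :=
      fun y hy => eq_of_beq (List.mem_takeWhile_imp (p := fun y => y == x) hy)
    have hrp : (xs.dropWhile (fun y => y == x)).Pairwise pvRle :=
      List.Pairwise.sublist (List.dropWhile_sublist _) hpw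
    have hrx : ∀ z ∈ xs.dropWhile (fun y => y == x), z ≠ x := by
      cases hre : xs.dropWhile (fun y => y == x) with
      | nil => intro z hz; cases hz
      | cons y0 r' =>
        have hy0 := List.head?_dropWhile_not (fun y => y == x) xs
        rw [hre] at hy0
        simp only [List.head?_cons] at hy0
        have hy0x : y0 ≠ x := fun h => by simp [h] at hy0
        have hxy0 : pvRle x y0 := hhead y0 (by rw [← hsplit, hre]; simp)
        intro z hz hzx
        rcases List.mem_cons.mp hz with rfl | hz'
        · exact hy0x hzx
        · have hpw2 := hrp
          rw [hre, List.pairwise_cons] at hpw2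
          have hyz : pvRle y0 z := hpw2.1 z hz'
          exact hy0x (pvRle_antisymm (hzx ▸ hyz) hxy0)
    have hxsc : ∀ a : Int × Int, xs.count a =
        (xs.takeWhile (fun y => y == x)).count a + (xs.dropWhile (fun y => y == x)).count a := by
      intro a
      conv_lhs => rw [← hsplit]
      rw [List.count_append]
    have hcount_t : (xs.takeWhile (fun y => y == x)).count x =
        (xs.takeWhile (fun y => y == x)).length :=
      List.count_eq_length.mpr (fun b hb => (htx b hb).symm)
    have hcount_r : (xs.dropWhile (fun y => y == x)).count x = 0 :=
      List.count_eq_zero.mpr (fun hm => hrx x hm rfl)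
    have ih := pvRunSingles_mem (xs.dropWhile (fun y => y == x)) hrp e
    simp only [pvRunSingles]
    by_cases hex : e = x
    · subst hex
      have hnr : e ∉ pvRunSingles (xs.dropWhile (fun y => y == e)) := fun hm => by
        have h1 := ih.mp hm
        omega
      constructor
      · intro hm
        rcases List.mem_append.mp hm with hm | hm
        · by_cases hte : xs.takeWhile (fun y => y == e) = []
          · rw [List.count_cons_self, hxsc e, hcount_r, hcount_t, hte]
            simp
          · rw [if_neg hte] at hm
            cases hm
        · exact absurd hm hnr
      · intro hc
        rw [List.count_cons_self, hxsc e, hcount_r, hcount_t] at hc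
        have hte : (xs.takeWhile (fun y => y == e)).length = 0 := by omega
        rw [List.length_eq_zero_iff.mp hte]
        simp
    · have hct : (xs.takeWhile (fun y => y == x)).count e = 0 :=
        List.count_eq_zero.mpr (fun hm => hex (htx e hm))
      have hce : (x :: xs).count e = (xs.dropWhile (fun y => y == x)).count e := by
        rw [List.count_cons_of_ne (fun h => hex h.symm), hxsc e, hct]
        omega
      rw [hce, ← ih]
      constructor
      · intro hm
        rcases List.mem_append.mp hm with hm | hm
        · split at hm <;> simp_all
        · exact hm
      · exact fun hm => List.mem_append.mpr (Or.inr hm)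
termination_by s.length
decreasing_by
  simp only [List.length_cons]
  exact Nat.lt_succ_of_le (List.length_dropWhile_le _ _)

-- first-occurrence dedup and filtering: if every element the predicate keeps occurs at most
-- once, deduplication does not change the filtered list
theorem pvFilter_foldl_add (l : List (Int × Int)) (acc : List (Int × Int)) (p : (Int × Int) → Bool)
    (h : ∀ e, p e = true → acc.count e + l.count e ≤ 1) :
    (l.foldl PySem.Set.add acc).filter p = acc.filter p ++ l.filter p := by
  induction l generalizing acc with
  | nil => simp
  | cons x l ih =>
    rw [List.foldl_cons]
    by_cases hc : PySem.Set.contains acc x = true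
    · have hadd : PySem.Set.add acc x = acc := by
        simp only [PySem.Set.add]
        rw [if_pos hc]
      have hmem : x ∈ acc := by
        simp only [PySem.Set.contains] at hc
        exact List.contains_iff_mem.mp hc
      have hpx : p x = false := by
        by_contra hpx
        rw [Bool.not_eq_false] at hpx
        have h1 := h x hpx
        rw [List.count_cons_self] at h1
        have h2 : 1 ≤ acc.count x := List.one_le_count_iff.mpr hmem
        omega
      rw [hadd, ih acc (fun e hpe => by
        have h1 := h e hpe
        rw [List.count_cons] at h1
        by_cases hbe : (x == e) = true <;> simp [hbe] at h1 <;> omega)]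
      simp [hpx]
    · have hadd : PySem.Set.add acc x = acc ++ [x] := by
        simp only [PySem.Set.add]
        rw [if_neg hc]
      rw [hadd, ih (acc ++ [x]) (fun e hpe => by
        have h1 := h e hpe
        rw [List.count_cons] at h1
        rw [List.count_append, List.count_singleton]
        by_cases hbe : (x == e) = true <;> simp [hbe] at h1 ⊢ <;> omega)]
      rw [List.filter_append]
      by_cases hpx : p x = true <;> simp [hpx]

-- A's nested counting loop is Counter of the flat edge list
theorem pvA_dict (faces : List (List Int)) :
    faces.foldl (fun d face =>
      (PySem.List.pyRange 0 (face.length : Int) 1).foldl (fun d k =>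
        d.modify (pvEdgeB face k) 0 (· + 1)) d) PySem.Dict.empty
      = PySem.Dict.counter (pvEs faces) := by
  rw [PySem.Dict.counter_eq_foldl, pvEs, List.foldl_flatMap]
  exact PySem.List.foldl_congr_mem _ _ _ _ (fun d face _ => by rw [pvEdges, List.foldl_map])

-- B's nested append loop builds the same flat edge list
theorem pvB_edges (faces : List (List Int)) :
    faces.foldl (fun acc face =>
      (PySem.List.pyRange 0 (face.length : Int) 1).foldl (fun acc k =>
        acc ++ [pvEdgeB face k]) acc) ([] : List (Int × Int)) = pvEs faces := by
  have h : ∀ (acc : List (Int × Int)) (face : List Int),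
      (PySem.List.pyRange 0 (face.length : Int) 1).foldl
        (fun acc k => acc ++ [pvEdgeB face k]) acc = acc ++ pvEdges face := by
    intro acc face
    rw [PySem.List.foldl_append_singleton_eq_map, pvEdges]
  rw [PySem.List.foldl_congr_mem faces _ (fun acc face => acc ++ pvEdges face) []
        (fun acc face _ => h acc face),
      PySem.List.foldl_append_eq_flatMap, pvEs]
  simp

-- ===== VERDICT (by name: the statement is the Claim_ definition above) =====
theorem get_boundary_set_py_spec : Claim_equal_get_boundary_set_py := by
  intro faces _
  show get_boundary_set_py faces = get_boundary_set_py_alt faces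
  simp only [get_boundary_set_py, get_boundary_set_py_alt, pvEdge_eq]
  rw [pvA_dict]
  rw [pvB_edges]
  rw [PySem.Dict.items_counter, List.foldl_map,
      PySem.List.foldl_if_eq_foldl_filter
        (p := fun k => ((List.count k (pvEs faces) : Int) == 1))
        (f := fun s k => PySem.Set.add (PySem.Set.add s k.1) k.2),
      PySem.List.foldl_if_eq_foldl_filter
        (p := fun e => (pvRunSingles (PySem.List.sorted2 (pvEs faces) Prod.fst Prod.snd)).contains e)
        (f := fun s e => PySem.Set.add (PySem.Set.add s e.1) e.2)]
  have hpoint : ∀ e : Int × Int,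
      ((pvRunSingles (PySem.List.sorted2 (pvEs faces) Prod.fst Prod.snd)).contains e)
        = ((List.count e (pvEs faces) : Int) == 1) := by
    intro e
    have h1 := pvRunSingles_mem _ (pvSorted2_pairwise (pvEs faces)) e
    have h2 := (PySem.List.sorted2_perm (pvEs faces) Prod.fst Prod.snd false).count_eq e
    rw [Bool.eq_iff_iff]
    simp only [List.contains_iff_mem, beq_iff_eq]
    rw [h1, h2]
    omega
  rw [List.filter_congr (fun e _ => hpoint e)]
  rw [PySem.Set.ofList_eq_foldl,
      pvFilter_foldl_add (pvEs faces) [] _ (fun e hpe => by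
        simp only [beq_iff_eq] at hpe
        have hone : List.count e (pvEs faces) = 1 := by exact_mod_cast hpe
        simp [hone])]
  simp
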